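-- pv_equiv track=rewrite | github.com/dhr7va/GeeksforGeeks-POTD-solutions | Game with String.py | minValue
-- ===== SOURCE A (Python) =====
-- import heapq
--
-- def minValue(s, k):
--     freq = {}
--     for char in s:
--         freq[char] = freq.get(char, 0) + 1
--
--     pq = [(-count, char) for char, count in freq.items()]
--     heapq.heapify(pq)
--
--     for _ in range(k):
--         if not pq:
--             break
--         count, char = heapq.heappop(pq)
--         count += 1
--         if count < 0:
--             heapq.heappush(pq, (count, char))
--
--     min_value = sum(count ** 2 for count, _ in pq)
--
--     return min_value
-- ===== SOURCE B (Python) =====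
-- def minValue(s, k):
--     freq = {}
--     for ch in s:
--         freq[ch] = freq.get(ch, 0) + 1
--     hist = {}
--     for v in freq.values():
--         hist[v] = hist.get(v, 0) + 1
--     runs = sorted(hist.items(), reverse=True)  # [(count, multiplicity)], counts strictly descending
--     if k <= 0 or not runs:
--         return sum(v * v * c for v, c in runs)
--     (lv, g) = runs[0]
--     return _squeeze(lv, g, k, runs[1:])
--
--
-- def _squeeze(lv, g, rem, runs):
--     # g entries are currently levelled at height lv; runs holds the untouched lower
--     # groups (value strictly below lv).  Spend rem decrements in bulk.
--     nxt = runs[0][0] if runs else 0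
--     need = g * (lv - nxt)
--     if rem >= need:
--         if not runs:
--             return 0
--         (v, c) = runs[0]
--         return _squeeze(v, g + c, rem - need, runs[1:])
--     q, r = divmod(rem, g)
--     return r * (lv - q - 1) ** 2 + (g - r) * (lv - q) ** 2 + sum(v * v * c for v, c in runs)
-- ===== Notes on version B (the rewrite author's own statement) =====
-- stated objective: faster
-- what changed: Replaces the heap with k one-unit pops (decrement the max count once per iteration) by a frequency-of-frequencies histogram sorted once, whose tied top groups are flattened level by level in bulk arithmetic (whole blocks of decrements, then divmod to spread the remainder), so the cost no longer depends on k or on per-unit steps.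
import Mathlib
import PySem

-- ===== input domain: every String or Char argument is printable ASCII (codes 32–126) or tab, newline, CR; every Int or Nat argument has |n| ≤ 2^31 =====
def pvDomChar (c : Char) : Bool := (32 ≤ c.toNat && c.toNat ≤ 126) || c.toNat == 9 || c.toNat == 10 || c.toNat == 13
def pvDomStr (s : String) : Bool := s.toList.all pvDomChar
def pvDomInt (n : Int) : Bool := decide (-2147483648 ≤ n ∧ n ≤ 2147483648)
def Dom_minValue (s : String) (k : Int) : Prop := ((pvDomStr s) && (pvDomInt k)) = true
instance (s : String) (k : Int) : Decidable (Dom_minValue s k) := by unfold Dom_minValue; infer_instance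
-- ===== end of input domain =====

-- B replaces A's per-unit heap greedy (k single decrements of the max count) by a histogram of
-- frequencies levelled group by group in bulk arithmetic; same return value everywhere.

-- ===== PORT A =====
-- Python tuple comparison (count, char): lexicographic.
def pairLtA (p q : Int × Char) : Bool := p.1 < q.1 || (p.1 == q.1 && p.2 < q.2)

-- the least pair of h :: t (what heappop returns)
def minPairA (h : Int × Char) (t : List (Int × Char)) : Int × Char :=
  t.foldl (fun m p => if pairLtA p m then p else m) h

-- the 'for _ in range(k)' loop over the heap, with its break on an empty heap.
-- heapq is ported by its observable contract on the pool: heapify's arrangement is unobservable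
-- here (the result sums over the whole pool), heappop removes the least pair (all pairs are
-- distinct: one per char), heappush adds a pair; this is exact for this program.
def aloopA : Nat → List (Int × Char) → List (Int × Char)
  | 0, pq => pq
  | _ + 1, [] => []                                   -- 'if not pq: break'
  | n + 1, a :: t =>
      let m := minPairA a t                           -- count, char = heappop(pq)
      let pq' := (a :: t).erase m
      let c := m.1 + 1                                -- count += 1
      aloopA n (if c < 0 then (c, m.2) :: pq' else pq')  -- 'if count < 0: heappush(...)'

def minValue (s : String) (k : Int) : Int :=
  let freq := s.toList.foldl (fun d ch => d.insert ch (d.getD ch 0 + 1)) PySem.Dict.empty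
  let pq := freq.items.map (fun p => (-p.2, p.1))
  let pq := aloopA k.toNat pq
  (pq.map (fun p => p.1 ^ 2)).sum

-- ===== PORT B =====
def sumsqRunsB (runs : List (Int × Int)) : Int := (runs.map (fun p => p.1 * p.1 * p.2)).sum

-- spend rem decrements on g entries levelled at lv, above the untouched lower groups
def squeezeB : Int → Int → Int → List (Int × Int) → Int
  | lv, g, rem, [] =>
      if rem ≥ g * lv then 0
      else
        let q := PySem.Int.floordiv rem g
        let r := PySem.Int.mod rem g
        r * (lv - q - 1) ^ 2 + (g - r) * (lv - q) ^ 2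
  | lv, g, rem, (v, c) :: rest =>
      let need := g * (lv - v)
      if rem ≥ need then squeezeB v (g + c) (rem - need) rest
      else
        let q := PySem.Int.floordiv rem g
        let r := PySem.Int.mod rem g
        r * (lv - q - 1) ^ 2 + (g - r) * (lv - q) ^ 2 + sumsqRunsB ((v, c) :: rest)

def minValue_alt (s : String) (k : Int) : Int :=
  let freq := s.toList.foldl (fun d ch => d.insert ch (d.getD ch 0 + 1)) PySem.Dict.empty
  let hist := freq.values.foldl (fun d v => d.insert v (d.getD v 0 + 1)) PySem.Dict.empty
  -- hist's keys are distinct, so Python's tuple comparison in sorted(hist.items(), reverse=True)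
  -- orders by the key alone
  let runs := PySem.List.sorted hist.items (fun p => p.1) true
  if k ≤ 0 then sumsqRunsB runs
  else
    match runs with
    | [] => 0
    | (lv, g) :: rest => squeezeB lv g k rest

-- ===== PRECONDITION & SPEC =====
def Spec_minValue (s : String) (k : Int) (out : Int) : Prop := out = minValue_alt s k
instance (s : String) (k : Int) (out : Int) : Decidable (Spec_minValue s k out) := by unfold Spec_minValue; infer_instance

-- ===== CLAIM (what is proved, stated in full; the proofs are below) =====
def Claim_equal_minValue : Prop := ∀ (s : String) (k : Int), Dom_minValue s k → Spec_minValue s k (minValue s k)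

-- ===== LEMMAS AND PROOFS =====

-- reference layer: the sorted-descending list of (positive) counts and the one-unit greedy step
def insD (x : Int) : List Int → List Int
  | [] => [x]
  | h :: t => if x < h then h :: insD x t else x :: h :: t

def dec1 : List Int → List Int
  | [] => []
  | h :: t => if h - 1 > 0 then insD (h - 1) t else t

def decIter : Nat → List Int → List Int
  | 0, l => l
  | n + 1, l => decIter n (dec1 l)

def sumsq (l : List Int) : Int := (l.map (fun x => x ^ 2)).sum

def expandRuns (rs : List (Int × Int)) : List Int :=
  rs.flatMap (fun p => List.replicate p.2.toNat p.1)

-- ---- the reference insert / step ----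
lemma insD_perm (x : Int) (l : List Int) : (insD x l).Perm (x :: l) := by
  induction l with
  | nil => simp [insD]
  | cons h t ih =>
    simp only [insD]
    split
    · exact (ih.cons h).trans (List.Perm.swap x h t)
    · exact List.Perm.refl _

lemma mem_insD {y x : Int} {l : List Int} : y ∈ insD x l ↔ y = x ∨ y ∈ l := by
  rw [(insD_perm x l).mem_iff]; simp

lemma insD_sorted {x : Int} {l : List Int} (hs : l.Pairwise (fun a b => b ≤ a)) :
    (insD x l).Pairwise (fun a b => b ≤ a) := by
  induction l with
  | nil => simp [insD]
  | cons h t ih =>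
    rcases List.pairwise_cons.mp hs with ⟨hh, ht⟩
    simp only [insD]
    split
    · rename_i hx
      refine List.pairwise_cons.mpr ⟨?_, ih ht⟩
      intro y hy
      rcases mem_insD.mp hy with rfl | hyt
      · omega
      · exact hh y hyt
    · rename_i hx
      refine List.pairwise_cons.mpr ⟨?_, hs⟩
      intro y hy
      rcases List.mem_cons.mp hy with rfl | hyt
      · omega
      · have := hh y hyt; omega

lemma insD_of_le {x : Int} {l : List Int} (h : ∀ y ∈ l, y ≤ x) : insD x l = x :: l := by
  cases l with
  | nil => rfl
  | cons a t =>
    have : ¬ x < a := by have := h a (List.mem_cons_self ..); omega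
    simp [insD, this]

lemma insD_replicate {x a : Int} (hxa : x < a) (m : Nat) (rest : List Int) :
    insD x (List.replicate m a ++ rest) = List.replicate m a ++ insD x rest := by
  induction m with
  | zero => simp
  | succ m ih => simp [List.replicate_succ, insD, hxa, ih]

lemma decIter_add (m n : Nat) (l : List Int) :
    decIter (m + n) l = decIter n (decIter m l) := by
  induction m generalizing l with
  | zero => simp [decIter]
  | succ m ih =>
    have : m + 1 + n = (m + n) + 1 := by omega
    rw [this]
    show decIter (m + n) (dec1 l) = _
    rw [ih (dec1 l)]
    rfl

lemma decIter_nil (n : Nat) : decIter n [] = [] := by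
  induction n with
  | zero => rfl
  | succ n ih => show decIter n (dec1 []) = _; simpa [dec1] using ih

-- ---- bulk-levelling facts ----
lemma decIter_partial {lv : Int} (hlv : 1 < lv) :
    ∀ (r : Nat) (g : Nat) (rest : List Int), r ≤ g → (∀ y ∈ rest, y ≤ lv - 1) →
      decIter r (List.replicate g lv ++ rest)
        = List.replicate (g - r) lv ++ (List.replicate r (lv - 1) ++ rest) := by
  intro r
  induction r with
  | zero => intro g rest _ _; simp [decIter]
  | succ r ih =>
    intro g rest hrg hrest
    obtain ⟨g', rfl⟩ : ∃ g', g = g' + 1 := ⟨g - 1, by omega⟩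
    have hstep : dec1 (List.replicate (g' + 1) lv ++ rest)
        = List.replicate g' lv ++ ((lv - 1) :: rest) := by
      rw [List.replicate_succ, List.cons_append]
      simp only [dec1]
      rw [if_pos (by omega), insD_replicate (by omega), insD_of_le hrest]
    show decIter r (dec1 _) = _
    rw [hstep, ih g' ((lv - 1) :: rest) (by omega)
        (by intro y hy; rcases List.mem_cons.mp hy with rfl | h; exacts [le_refl _, hrest y h])]
    have h1 : g' + 1 - (r + 1) = g' - r := by omega
    rw [h1]
    congr 1
    rw [List.replicate_succ' (n := r)]
    simp

lemma decIter_ones : ∀ (r : Nat) (g : Nat) (rest : List Int), r ≤ g →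
    decIter r (List.replicate g (1 : Int) ++ rest) = List.replicate (g - r) 1 ++ rest := by
  intro r
  induction r with
  | zero => intro g rest _; simp [decIter]
  | succ r ih =>
    intro g rest hrg
    obtain ⟨g', rfl⟩ : ∃ g', g = g' + 1 := ⟨g - 1, by omega⟩
    have hstep : dec1 (List.replicate (g' + 1) (1 : Int) ++ rest)
        = List.replicate g' (1 : Int) ++ rest := by
      rw [List.replicate_succ, List.cons_append]
      simp [dec1]
    show decIter r (dec1 _) = _
    rw [hstep, ih g' rest (by omega)]
    congr 2
    omega

lemma decIter_rounds : ∀ (d : Nat) (lv : Int) (g : Nat) (rest : List Int), 0 < g →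
    (d : Int) ≤ lv - 1 → (∀ y ∈ rest, y ≤ lv - d) →
    decIter (g * d) (List.replicate g lv ++ rest) = List.replicate g (lv - d) ++ rest := by
  intro d
  induction d with
  | zero => intro lv g rest _ _ _; simp [decIter]
  | succ d ih =>
    intro lv g rest hg hd hrest
    have hlv : 1 < lv := by push_cast at hd; omega
    have hsplit : g * (d + 1) = g + g * d := by ring
    rw [hsplit, decIter_add]
    rw [decIter_partial hlv g g rest le_rfl
        (by intro y hy; have := hrest y hy; push_cast at hd ⊢; omega)]
    simp only [Nat.sub_self, List.replicate_zero, List.nil_append]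
    rw [ih (lv - 1) g rest hg (by push_cast at hd ⊢; omega)
        (by intro y hy; have := hrest y hy; push_cast at this ⊢; omega)]
    congr 2
    push_cast
    ring

-- ---- sums of squares ----
lemma sumsq_append (a b : List Int) : sumsq (a ++ b) = sumsq a + sumsq b := by
  simp [sumsq]

lemma sumsq_replicate (n : Nat) (x : Int) : sumsq (List.replicate n x) = n * x ^ 2 := by
  simp [sumsq, List.map_replicate, List.sum_replicate]

lemma sumsq_perm {a b : List Int} (h : a.Perm b) : sumsq a = sumsq b := by
  unfold sumsq
  exact (h.map _).sum_eq

lemma sumsq_expand {rs : List (Int × Int)} (hc : ∀ p ∈ rs, 0 < p.2) :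
    sumsq (expandRuns rs) = sumsqRunsB rs := by
  induction rs with
  | nil => simp [expandRuns, sumsq, sumsqRunsB]
  | cons p rest ih =>
    have h2 : (p.2.toNat : Int) = p.2 :=
      Int.toNat_of_nonneg (le_of_lt (hc p (List.mem_cons_self ..)))
    have : expandRuns (p :: rest) = List.replicate p.2.toNat p.1 ++ expandRuns rest := by
      simp [expandRuns]
    rw [this, sumsq_append, sumsq_replicate, ih (fun q hq => hc q (List.mem_cons_of_mem _ hq))]
    simp only [sumsqRunsB, List.map_cons, List.sum_cons]
    rw [h2]; ring

lemma mem_expand {y : Int} {rs : List (Int × Int)} (h : y ∈ expandRuns rs) :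
    ∃ p ∈ rs, y = p.1 := by
  rcases List.mem_flatMap.mp h with ⟨p, hp, hy⟩
  exact ⟨p, hp, List.eq_of_mem_replicate hy⟩

-- ---- the levelling computation equals iterated greedy ----
lemma squeeze_eq : ∀ (runs : List (Int × Int)) (lv g rem : Int),
    0 < lv → 0 < g → 0 ≤ rem →
    (∀ p ∈ runs, 0 < p.1) → (∀ p ∈ runs, 0 < p.2) → (∀ p ∈ runs, p.1 < lv) →
    runs.Pairwise (fun a b => b.1 < a.1) →
    squeezeB lv g rem runs
      = sumsq (decIter rem.toNat (List.replicate g.toNat lv ++ expandRuns runs)) := by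
  intro runs
  induction runs with
  | nil =>
    intro lv g rem hlv hg hrem _ _ _ _
    simp only [squeezeB, expandRuns, List.flatMap_nil, List.append_nil]
    have hgl : (g * lv).toNat = g.toNat * lv.toNat := Int.toNat_mul (by omega) (by omega)
    by_cases hbig : rem ≥ g * lv
    · rw [if_pos hbig]
      have hrt : rem.toNat = g.toNat * (lv.toNat - 1) + g.toNat + (rem - g * lv).toNat := by
        have h1 : g.toNat * (lv.toNat - 1) = g.toNat * lv.toNat - g.toNat := by
          rw [Nat.mul_sub, Nat.mul_one]
        have h2 : g.toNat ≤ g.toNat * lv.toNat := by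
          have : 1 ≤ lv.toNat := by omega
          calc g.toNat = g.toNat * 1 := by ring
          _ ≤ g.toNat * lv.toNat := Nat.mul_le_mul_left _ this
        omega
      rw [hrt, decIter_add, decIter_add]
      rw [show (List.replicate g.toNat lv : List Int) = List.replicate g.toNat lv ++ [] by simp]
      rw [decIter_rounds (lv.toNat - 1) lv g.toNat [] (by omega)
            (by omega) (by intro y hy; simp at hy)]
      have : lv - ((lv.toNat - 1 : Nat) : Int) = 1 := by omega
      rw [this, decIter_ones g.toNat g.toNat [] le_rfl]
      simp [decIter_nil, sumsq]
    · rw [if_neg hbig]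
      push_neg at hbig
      rw [PySem.Int.floordiv_eq_ediv_of_pos hg, PySem.Int.mod_eq_emod_of_pos hg]
      set q := rem / g with hq
      set r := rem % g with hr
      have heq : g * q + r = rem := Int.ediv_add_emod rem g
      have hr0 : 0 ≤ r := Int.emod_nonneg rem (by omega)
      have hrg : r < g := Int.emod_lt_of_pos rem hg
      have hq0 : 0 ≤ q := Int.ediv_nonneg (by omega) (by omega)
      have hqlv : q < lv := by
        by_contra hcon
        push_neg at hcon
        have : g * lv ≤ g * q := by
          exact mul_le_mul_of_nonneg_left hcon (le_of_lt hg)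
        omega
      have hgq : (g * q).toNat = g.toNat * q.toNat := Int.toNat_mul (by omega) (by omega)
      have hgq0 : 0 ≤ g * q := mul_nonneg (by omega) hq0
      have hrt : rem.toNat = g.toNat * q.toNat + r.toNat := by rw [← hgq]; omega
      rw [hrt, decIter_add]
      rw [show (List.replicate g.toNat lv : List Int) = List.replicate g.toNat lv ++ [] by simp]
      rw [decIter_rounds q.toNat lv g.toNat [] (by omega)
            (by omega) (by intro y hy; simp at hy)]
      have hlvq : lv - ((q.toNat : Nat) : Int) = lv - q := by omega
      rw [hlvq]
      by_cases h2 : 1 < lv - q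
      · rw [decIter_partial h2 r.toNat g.toNat [] (by omega) (by intro y hy; simp at hy)]
        rw [List.append_nil, sumsq_append, sumsq_replicate, sumsq_replicate]
        have c1 : ((g.toNat - r.toNat : Nat) : Int) = g - r := by omega
        have c2 : ((r.toNat : Nat) : Int) = r := by omega
        rw [c1, c2]; ring
      · have hlq1 : lv - q = 1 := by omega
        have : List.replicate g.toNat (lv - q) = List.replicate g.toNat (1 : Int) := by rw [hlq1]
        rw [this, decIter_ones r.toNat g.toNat [] (by omega)]
        rw [List.append_nil, sumsq_replicate]
        have c1 : ((g.toNat - r.toNat : Nat) : Int) = g - r := by omega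
        rw [c1, hlq1]; ring
  | cons pc rest ih =>
    intro lv g rem hlv hg hrem hposv hposc hlt hchain
    obtain ⟨v, c⟩ := pc
    have hv0 : 0 < v := hposv (v, c) (List.mem_cons_self ..)
    have hc0 : 0 < c := hposc (v, c) (List.mem_cons_self ..)
    have hvlv : v < lv := hlt (v, c) (List.mem_cons_self ..)
    have hrestlt : ∀ p ∈ rest, p.1 < v := by
      intro p hp
      exact (List.pairwise_cons.mp hchain).1 p hp
    have hexp : expandRuns ((v, c) :: rest) = List.replicate c.toNat v ++ expandRuns rest := by
      simp [expandRuns]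
    simp only [squeezeB]
    by_cases hbig : rem ≥ g * (lv - v)
    · rw [if_pos hbig]
      have hneed0 : 0 ≤ g * (lv - v) := mul_nonneg (by omega) (by omega)
      have hd : ((lv - v).toNat : Int) = lv - v := by omega
      have hgd : (g * (lv - v)).toNat = g.toNat * (lv - v).toNat := Int.toNat_mul (by omega) (by omega)
      have hrt : rem.toNat = g.toNat * (lv - v).toNat + (rem - g * (lv - v)).toNat := by omega
      rw [hexp, hrt, decIter_add]
      rw [decIter_rounds (lv - v).toNat lv g.toNat _ (by omega) (by omega)
            (by
              intro y hy
              rw [hd]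
              rcases List.mem_append.mp hy with h | h
              · have := List.eq_of_mem_replicate h; omega
              · rcases mem_expand h with ⟨p, hp, rfl⟩
                have := hrestlt p hp; omega)]
      rw [hd]
      have hmerge : List.replicate g.toNat (lv - (lv - v)) ++ (List.replicate c.toNat v ++ expandRuns rest)
          = List.replicate (g + c).toNat v ++ expandRuns rest := by
        have : lv - (lv - v) = v := by ring
        rw [this, ← List.append_assoc, ← List.replicate_add]
        congr 2
        omega
      rw [hmerge]
      exact ih v (g + c) (rem - g * (lv - v)) hv0 (by omega) (by omega)
            (fun p hp => hposv p (List.mem_cons_of_mem _ hp))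
            (fun p hp => hposc p (List.mem_cons_of_mem _ hp))
            hrestlt (List.pairwise_cons.mp hchain).2
    · rw [if_neg hbig]
      push_neg at hbig
      rw [PySem.Int.floordiv_eq_ediv_of_pos hg, PySem.Int.mod_eq_emod_of_pos hg]
      set q := rem / g with hq
      set r := rem % g with hr
      have heq : g * q + r = rem := Int.ediv_add_emod rem g
      have hr0 : 0 ≤ r := Int.emod_nonneg rem (by omega)
      have hrg : r < g := Int.emod_lt_of_pos rem hg
      have hq0 : 0 ≤ q := Int.ediv_nonneg (by omega) (by omega)
      have hqlv : q < lv - v := by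
        by_contra hcon
        push_neg at hcon
        have : g * (lv - v) ≤ g * q := mul_le_mul_of_nonneg_left hcon (le_of_lt hg)
        omega
      have hgq : (g * q).toNat = g.toNat * q.toNat := Int.toNat_mul (by omega) (by omega)
      have hgq0 : 0 ≤ g * q := mul_nonneg (by omega) hq0
      have hrt : rem.toNat = g.toNat * q.toNat + r.toNat := by rw [← hgq]; omega
      rw [hexp, hrt, decIter_add]
      rw [decIter_rounds q.toNat lv g.toNat _ (by omega) (by omega)
            (by
              intro y hy
              have hqc : ((q.toNat : Nat) : Int) = q := by omega
              rw [hqc]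
              rcases List.mem_append.mp hy with h | h
              · have := List.eq_of_mem_replicate h; omega
              · rcases mem_expand h with ⟨p, hp, rfl⟩
                have := hrestlt p hp; omega)]
      have hqc : lv - ((q.toNat : Nat) : Int) = lv - q := by omega
      rw [hqc]
      have h2 : 1 < lv - q := by omega
      rw [decIter_partial h2 r.toNat g.toNat _ (by omega)
            (by
              intro y hy
              rcases List.mem_append.mp hy with h | h
              · have := List.eq_of_mem_replicate h; omega
              · rcases mem_expand h with ⟨p, hp, rfl⟩
                have := hrestlt p hp; omega)]
      rw [sumsq_append, sumsq_append, sumsq_replicate, sumsq_replicate,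
          ← hexp, sumsq_expand (fun p hp => hposc p hp)]
      have c1 : ((g.toNat - r.toNat : Nat) : Int) = g - r := by omega
      have c2 : ((r.toNat : Nat) : Int) = r := by omega
      rw [c1, c2]; ring

-- ---- the heap loop pops the largest count: multiset tracking ----
lemma minPairA_cons (h p : Int × Char) (t : List (Int × Char)) :
    minPairA h (p :: t) = minPairA (if pairLtA p h then p else h) t := rfl

lemma minPairA_mem (t : List (Int × Char)) : ∀ h, minPairA h t ∈ h :: t := by
  induction t with
  | nil => intro h; simp [minPairA]
  | cons p t ih =>
    intro h
    rw [minPairA_cons]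
    rcases List.mem_cons.mp (ih (if pairLtA p h then p else h)) with he | ht
    · rw [he]; split <;> simp
    · exact List.mem_cons_of_mem _ (List.mem_cons_of_mem _ ht)

lemma minPairA_le (t : List (Int × Char)) :
    ∀ h, ∀ p' ∈ h :: t, (minPairA h t).1 ≤ p'.1 := by
  induction t with
  | nil =>
    intro h p' hp'
    rcases List.mem_cons.mp hp' with rfl | hp'
    · exact le_refl _
    · simp at hp'
  | cons p t ih =>
    intro h p' hp'
    rw [minPairA_cons]
    have hkey : (if pairLtA p h then p else h).1 ≤ h.1 ∧ (if pairLtA p h then p else h).1 ≤ p.1 := by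
      by_cases hb : pairLtA p h = true
      · rw [if_pos hb]
        simp only [pairLtA, Bool.or_eq_true, decide_eq_true_eq, Bool.and_eq_true, beq_iff_eq] at hb
        constructor
        · rcases hb with h1 | ⟨h1, _⟩ <;> omega
        · exact le_refl _
      · rw [if_neg hb]
        have hnlt : ¬ p.1 < h.1 := fun hlt => hb (by simp [pairLtA, hlt])
        exact ⟨le_refl _, by omega⟩
    have hmin := ih (if pairLtA p h then p else h)
    rcases List.mem_cons.mp hp' with rfl | hp'
    · exact le_trans (hmin _ (List.mem_cons_self ..)) hkey.1
    · rcases List.mem_cons.mp hp' with rfl | hp''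
      · exact le_trans (hmin _ (List.mem_cons_self ..)) hkey.2
      · exact hmin p' (List.mem_cons_of_mem _ hp'')

lemma aloopA_perm : ∀ (n : Nat) (pq : List (Int × Char)) (l : List Int),
    ((pq.map (fun p => -p.1)).Perm l) → l.Pairwise (fun a b => b ≤ a) → (∀ x ∈ l, 0 < x) →
    ((aloopA n pq).map (fun p => -p.1)).Perm (decIter n l) := by
  intro n
  induction n with
  | zero => intro pq l hperm _ _; exact hperm
  | succ n ih =>
    intro pq l hperm hsorted hpos
    cases pq with
    | nil =>
      have : l = [] := (hperm.symm).eq_nil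
      subst this
      show ((aloopA (n + 1) []).map _).Perm (decIter n (dec1 []))
      simp [aloopA, dec1, decIter_nil]
    | cons a t =>
      cases l with
      | nil =>
        have := hperm.eq_nil
        simp at this
      | cons h t' =>
        set f : Int × Char → Int := fun p => -p.1 with hf
        set m := minPairA a t with hm
        have hmem : m ∈ a :: t := minPairA_mem t a
        have hple : ∀ p' ∈ a :: t, m.1 ≤ p'.1 := minPairA_le t a
        have hppq : (a :: t).Perm (m :: (a :: t).erase m) := List.perm_cons_erase hmem
        have hmap : ((a :: t).map f).Perm (-m.1 :: ((a :: t).erase m).map f) := by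
          simpa using hppq.map f
        have hl : (h :: t').Perm (-m.1 :: ((a :: t).erase m).map f) := hperm.symm.trans hmap
        have hm1 : -m.1 = h := by
          have h1 : -m.1 ∈ h :: t' := hl.symm.subset (List.mem_cons_self ..)
          have h2 : ∀ y ∈ h :: t', y ≤ -m.1 := by
            intro y hy
            have : y ∈ (a :: t).map f := hperm.symm.subset hy
            rcases List.mem_map.mp this with ⟨p, hp, rfl⟩
            have := hple p hp
            simp [hf]
            omega
          have h3 : ∀ y ∈ t', y ≤ h := (List.pairwise_cons.mp hsorted).1
          have h4 : -m.1 ≤ h := by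
            rcases List.mem_cons.mp h1 with he | ht'
            · omega
            · exact h3 _ ht'
          have h5 : h ≤ -m.1 := h2 h (List.mem_cons_self ..)
          omega
        rw [hm1] at hl
        have hX : (((a :: t).erase m).map f).Perm t' := (hl.cons_inv).symm
        show ((aloopA n _).map f).Perm (decIter n (dec1 (h :: t')))
        by_cases hc : m.1 + 1 < 0
        · rw [if_pos hc]
          have hd : dec1 (h :: t') = insD (h - 1) t' := by
            simp only [dec1]
            rw [if_pos (by omega)]
          rw [hd]
          apply ih
          · show ((-(m.1 + 1)) :: ((a :: t).erase m).map f).Perm (insD (h - 1) t')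
            have : -(m.1 + 1) = h - 1 := by omega
            rw [this]
            exact ((hX).cons (h - 1)).trans (insD_perm (h - 1) t').symm
          · exact insD_sorted (List.pairwise_cons.mp hsorted).2
          · intro x hx
            rcases mem_insD.mp hx with rfl | hxt
            · omega
            · exact hpos x (List.mem_cons_of_mem _ hxt)
        · rw [if_neg hc]
          have hd : dec1 (h :: t') = t' := by
            simp only [dec1]
            rw [if_neg (by omega)]
          rw [hd]
          exact ih _ _ hX (List.pairwise_cons.mp hsorted).2
            (fun x hx => hpos x (List.mem_cons_of_mem _ hx))

-- ---- expanding the run-length histogram ----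
lemma replicate_pairwise_ge (n : Nat) (x : Int) :
    (List.replicate n x).Pairwise (fun a b => b ≤ a) := by
  exact List.pairwise_replicate_of_refl

lemma expand_sorted {rs : List (Int × Int)} (hchain : rs.Pairwise (fun a b => b.1 < a.1)) :
    (expandRuns rs).Pairwise (fun a b => b ≤ a) := by
  induction rs with
  | nil => simp [expandRuns]
  | cons p rest ih =>
    rw [show expandRuns (p :: rest) = List.replicate p.2.toNat p.1 ++ expandRuns rest from by
      simp [expandRuns]]
    rcases List.pairwise_cons.mp hchain with ⟨hhd, htl⟩
    apply List.pairwise_append.mpr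
    refine ⟨replicate_pairwise_ge _ _, ih htl, ?_⟩
    intro x hx y hy
    have hx' := List.eq_of_mem_replicate hx
    rcases mem_expand hy with ⟨q, hq, rfl⟩
    have := hhd q hq
    omega

lemma count_flatMap_rep (ds : List Int) (f : Int → Nat) (x : Int) (hnd : ds.Nodup) :
    (ds.flatMap (fun k => List.replicate (f k) k)).count x = if x ∈ ds then f x else 0 := by
  induction ds with
  | nil => simp
  | cons d ds ih =>
    rcases List.nodup_cons.mp hnd with ⟨hd, hnd'⟩
    rw [List.flatMap_cons, List.count_append, List.count_replicate, ih hnd']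
    by_cases hx : x = d
    · subst hx
      simp [hd]
    · simp [Ne.symm hx, hx]

lemma flatMap_replicate_perm (ds vals : List Int) (hnd : ds.Nodup)
    (hmem : ∀ x, x ∈ ds ↔ x ∈ vals) :
    (ds.flatMap (fun k => List.replicate (vals.count k) k)).Perm vals := by
  rw [List.perm_iff_count]
  intro x
  rw [count_flatMap_rep ds _ x hnd]
  by_cases hx : x ∈ vals
  · simp [(hmem x).mpr hx]
  · rw [if_neg (fun h => hx ((hmem x).mp h)), List.count_eq_zero_of_not_mem hx]

lemma pairwise_lt_of_le_nodup {l : List (Int × Int)}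
    (h1 : l.Pairwise (fun a b => b.1 ≤ a.1)) (h2 : (l.map Prod.fst).Nodup) :
    l.Pairwise (fun a b => b.1 < a.1) := by
  have h3 : l.Pairwise (fun a b => a.1 ≠ b.1) := List.pairwise_map.mp h2
  exact (h1.and h3).imp (fun h => lt_of_le_of_ne h.1 (Ne.symm h.2))

-- ---- assembling both ports ----
lemma AB_eq (s : String) (k : Int) : minValue s k = minValue_alt s k := by
  simp only [minValue, minValue_alt, PySem.Dict.foldl_insert_getD_add_one_eq_counter]
  set cs := s.toList with hcs
  set vals := (PySem.Dict.counter cs).values with hvals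
  set runs := PySem.List.sorted (PySem.Dict.counter vals).items (fun p => p.1) true with hruns
  have hvalsdef : vals = ((PySem.Dict.counter cs).items).map Prod.snd := rfl
  have hvpos : ∀ v ∈ vals, 0 < v := by
    intro v hv
    rw [hvalsdef, PySem.Dict.items_counter] at hv
    rcases List.mem_map.mp hv with ⟨p, hp, rfl⟩
    rcases List.mem_map.mp hp with ⟨c, hc, rfl⟩
    have hmem : c ∈ cs := (PySem.Set.mem_ofList cs c).mp hc
    have := List.count_pos_iff.mpr hmem
    simpa using this
  have hperm_runs : runs.Perm ((PySem.Dict.counter vals).items) :=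
    PySem.List.sorted_perm _ _ _
  have hchain_le : runs.Pairwise (fun a b => b.1 ≤ a.1) :=
    PySem.List.sorted_pairwise_rev _ _
  have hfstnodup : (runs.map Prod.fst).Nodup := by
    have h1 : ((((PySem.Dict.counter vals).items)).map Prod.fst).Nodup := by
      rw [PySem.Dict.items_counter, List.map_map]
      have he : (Prod.fst ∘ fun k => (k, ((vals.count k : Nat) : Int))) = id := rfl
      rw [he, List.map_id]
      exact PySem.Set.nodup_ofList vals
    exact ((hperm_runs.map Prod.fst).nodup_iff).mpr h1
  have hchain := pairwise_lt_of_le_nodup hchain_le hfstnodup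
  have hmemruns : ∀ p ∈ runs, ∃ kk, kk ∈ vals ∧ p = (kk, ((vals.count kk : Nat) : Int)) := by
    intro p hp
    have := hperm_runs.subset hp
    rw [PySem.Dict.items_counter] at this
    rcases List.mem_map.mp this with ⟨c, hc, rfl⟩
    exact ⟨c, (PySem.Set.mem_ofList vals c).mp hc, rfl⟩
  have hr1 : ∀ p ∈ runs, 0 < p.1 := by
    intro p hp
    rcases hmemruns p hp with ⟨c, hc, rfl⟩
    exact hvpos c hc
  have hr2 : ∀ p ∈ runs, 0 < p.2 := by
    intro p hp
    rcases hmemruns p hp with ⟨c, hc, rfl⟩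
    have := List.count_pos_iff.mpr hc
    simpa using this
  have hLsorted := expand_sorted hchain
  have hLpos : ∀ x ∈ expandRuns runs, 0 < x := by
    intro x hx
    rcases mem_expand hx with ⟨p, hp, rfl⟩
    exact hr1 p hp
  have hpermL : vals.Perm (expandRuns runs) := by
    have h1 : (expandRuns runs).Perm (expandRuns ((PySem.Dict.counter vals).items)) :=
      List.Perm.flatMap_right _ hperm_runs
    have h2 : expandRuns ((PySem.Dict.counter vals).items)
        = (PySem.Set.ofList vals).flatMap (fun k => List.replicate (vals.count k) k) := by
      rw [PySem.Dict.items_counter]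
      simp only [expandRuns, List.flatMap_map, Function.comp_def, Int.toNat_natCast]
    have h3 : ((PySem.Set.ofList vals).flatMap
        (fun k => List.replicate (vals.count k) k)).Perm vals :=
      flatMap_replicate_perm _ _ (PySem.Set.nodup_ofList vals)
        (fun x => PySem.Set.mem_ofList vals x)
    exact (h1.trans (h2 ▸ h3)).symm
  -- the A side
  have hpoolmap :
      ((((PySem.Dict.counter cs).items).map (fun p => (-p.2, p.1))).map (fun p => -p.1)) = vals := by
    rw [hvalsdef]
    simp [List.map_map, Function.comp_def]
  have happ := aloopA_perm k.toNat (((PySem.Dict.counter cs).items).map (fun p => (-p.2, p.1)))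
      (expandRuns runs) (by rw [hpoolmap]; exact hpermL) hLsorted hLpos
  have hsq : ∀ (lst : List (Int × Char)),
      (lst.map (fun p => p.1 ^ 2)).sum = sumsq (lst.map (fun p => -p.1)) := by
    intro lst
    simp [sumsq, List.map_map, Function.comp_def]
  rw [hsq, sumsq_perm happ]
  -- the B side
  by_cases hk : k ≤ 0
  · rw [if_pos hk, Int.toNat_of_nonpos hk]
    exact sumsq_expand hr2
  · rw [if_neg hk]
    cases hrc : runs with
    | nil =>
      simp [expandRuns, decIter_nil, sumsq]
    | cons p rest =>
      obtain ⟨lv, g⟩ := p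
      rw [hrc] at hchain hr1 hr2
      show sumsq (decIter k.toNat (expandRuns ((lv, g) :: rest))) = squeezeB lv g k rest
      rw [show expandRuns ((lv, g) :: rest) = List.replicate g.toNat lv ++ expandRuns rest from by
        simp [expandRuns]]
      exact (squeeze_eq rest lv g k
            (hr1 (lv, g) (List.mem_cons_self ..))
            (hr2 (lv, g) (List.mem_cons_self ..))
            (by omega)
            (fun p hp => hr1 p (List.mem_cons_of_mem _ hp))
            (fun p hp => hr2 p (List.mem_cons_of_mem _ hp))
            (fun p hp => (List.pairwise_cons.mp hchain).1 p hp)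
            (List.pairwise_cons.mp hchain).2).symm

theorem minValue_spec : Claim_equal_minValue := by
  intro s k _
  show minValue s k = minValue_alt s k
  exact AB_eq s k
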